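-- pv_equiv track=rewrite | github.com/schemathesis/schemathesis | test/conftest.py | clean_stateful_tests
-- ===== SOURCE A (Python) =====
-- def clean_stateful_tests(lines):
--     start_idx = None
--     for i, line in enumerate(lines):
--         if "Fuzzing (in" in line:
--             start_idx = i + 3
--             break
--     if start_idx is None:
--         for i, line in enumerate(lines):
--             if "API probing failed" in line:
--                 start_idx = i + 1
--                 break
--             if "API capabilities" in line:
--                 start_idx = i + 3
--                 break
--
--     end_idx = None
--     for i, line in enumerate(lines):
--         if "Stateful (in" in line:
--             end_idx = i
--             break
--
--     if start_idx is not None and end_idx is not None: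
--         return lines[: start_idx + 1] + lines[end_idx:]
--     return lines
-- ===== SOURCE B (Python) =====
-- def _stateful_tail(lines):
--     # dropwhile-style collector: the suffix starting at the first "Stateful (in" line
--     out = None
--     for line in lines:
--         if out is None:
--             if "Stateful (in" in line:
--                 out = [line]
--         else:
--             out.append(line)
--     return out
--
--
-- def _header(lines, has_fuzz):
--     # accumulate lines up to and including the start marker, then count down the
--     # extra lines that stay with it (3 after fuzzing/capabilities, 1 after probing)
--     out = []
--     pad = None
--     for line in lines:
--         if pad is None:
--             out.append(line)
--             if has_fuzz:
--                 if "Fuzzing (in" in line: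
--                     pad = 3
--             elif "API probing failed" in line:
--                 pad = 1
--             elif "API capabilities" in line:
--                 pad = 3
--         elif pad > 0:
--             out.append(line)
--             pad -= 1
--         else:
--             break
--     return out if pad is not None else None
--
--
-- def clean_stateful_tests(lines):
--     tail = _stateful_tail(lines)
--     if tail is None:
--         return lines
--     head = _header(lines, any("Fuzzing (in" in l for l in lines))
--     if head is None:
--         return lines
--     return head + tail
-- ===== Notes on version B (the rewrite author's own statement) =====
-- stated objective: alternative
-- what changed: B computes no indices and no slices: it builds the kept head segment directly by accumulating lines through the start marker plus a countdown of the lines kept after it, collects the trailing segment from the first 'Stateful' line with a dropwhile-style collector, and concatenates the two segments (with an existence pre-check giving the fuzzing marker priority).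
import Mathlib
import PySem

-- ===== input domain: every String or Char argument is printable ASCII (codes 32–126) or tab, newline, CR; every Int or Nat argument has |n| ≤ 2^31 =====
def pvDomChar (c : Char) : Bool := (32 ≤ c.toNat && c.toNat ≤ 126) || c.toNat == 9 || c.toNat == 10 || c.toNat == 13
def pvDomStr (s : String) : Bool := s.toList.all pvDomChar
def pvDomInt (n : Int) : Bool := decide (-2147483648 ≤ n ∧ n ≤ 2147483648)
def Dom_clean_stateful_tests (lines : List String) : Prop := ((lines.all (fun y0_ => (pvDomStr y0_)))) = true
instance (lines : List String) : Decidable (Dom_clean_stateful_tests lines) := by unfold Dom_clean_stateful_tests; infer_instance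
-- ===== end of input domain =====

-- B never computes indices or slices: it collects the kept head segment (marker line plus a
-- countdown of trailing lines) and the "Stateful" suffix directly and concatenates them
-- (alternative decomposition, same cost).

set_option maxRecDepth 8192

-- ===== PORT A =====
-- first loop: break on "Fuzzing (in", yielding i+3
def aFindFuzz : List String → Int → Option Int
  | [], _ => none
  | l :: rest, i =>
    if PySem.Str.isIn "Fuzzing (in" l then some (i + 3) else aFindFuzz rest (i + 1)

-- fallback loop: break on "API probing failed" (i+1) or "API capabilities" (i+3), in that order
def aFindFallback : List String → Int → Option Int
  | [], _ => none
  | l :: rest, i =>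
    if PySem.Str.isIn "API probing failed" l then some (i + 1)
    else if PySem.Str.isIn "API capabilities" l then some (i + 3)
    else aFindFallback rest (i + 1)

-- end loop: break on "Stateful (in", yielding i
def aFindEnd : List String → Int → Option Int
  | [], _ => none
  | l :: rest, i =>
    if PySem.Str.isIn "Stateful (in" l then some i else aFindEnd rest (i + 1)

def clean_stateful_tests (lines : List String) : List String :=
  let start0 := aFindFuzz lines 0
  let startIdx := match start0 with
    | some s => some s
    | none => aFindFallback lines 0
  let endIdx := aFindEnd lines 0
  match startIdx, endIdx with
  | some s, some e =>
      PySem.List.slice lines none (some (s + 1)) ++ PySem.List.slice lines (some e) none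
  | _, _ => lines

-- ===== PORT B =====
-- _stateful_tail's loop body: collect the suffix from the first "Stateful (in" line on
def bTailStep (out : Option (List String)) (line : String) : Option (List String) :=
  match out with
  | none => if PySem.Str.isIn "Stateful (in" line then some [line] else none
  | some o => some (o ++ [line])

def bTail (lines : List String) : Option (List String) :=
  lines.foldl bTailStep none

-- _header's loop: accumulate through the start marker, then count down pad extra lines
def bHeaderGo (hasFuzz : Bool) : List String → List String → Option Int → Option (List String)
  | [], out, pad => if pad.isSome then some out else none
  | line :: rest, out, pad =>
    match pad with
    | none =>
      let out' := out ++ [line]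
      if hasFuzz then
        if PySem.Str.isIn "Fuzzing (in" line then bHeaderGo hasFuzz rest out' (some 3)
        else bHeaderGo hasFuzz rest out' none
      else if PySem.Str.isIn "API probing failed" line then bHeaderGo hasFuzz rest out' (some 1)
      else if PySem.Str.isIn "API capabilities" line then bHeaderGo hasFuzz rest out' (some 3)
      else bHeaderGo hasFuzz rest out' none
    | some p =>
      if p > 0 then bHeaderGo hasFuzz rest (out ++ [line]) (some (p - 1))
      else some out  -- break

def clean_stateful_tests_alt (lines : List String) : List String :=
  match bTail lines with
  | none => lines
  | some tail =>
    match bHeaderGo (lines.any (fun l => PySem.Str.isIn "Fuzzing (in" l)) lines [] none with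
    | none => lines
    | some head => head ++ tail

-- ===== PRECONDITION & SPEC =====
def Spec_clean_stateful_tests (lines : List String) (out : List String) : Prop := out = clean_stateful_tests_alt lines
instance (lines : List String) (out : List String) : Decidable (Spec_clean_stateful_tests lines out) := by unfold Spec_clean_stateful_tests; infer_instance

-- ===== CLAIM (what is proved, stated in full; the proofs are below) =====
def Claim_equal_clean_stateful_tests : Prop := ∀ (lines : List String), Dom_clean_stateful_tests lines → Spec_clean_stateful_tests lines (clean_stateful_tests lines)

-- ===== LEMMAS AND PROOFS =====

-- Nat-level spec of the fallback scan: the LENGTH of the kept head (i + pad + 1)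
def gFall : List String → Option Nat
  | [] => none
  | l :: rest =>
    if PySem.Str.isIn "API probing failed" l then some 2
    else if PySem.Str.isIn "API capabilities" l then some 4
    else (gFall rest).map (· + 1)

theorem aFindFuzz_eq (lines : List String) (k : Int) :
    aFindFuzz lines k =
      (lines.findIdx? (fun l => PySem.Str.isIn "Fuzzing (in" l)).map
        (fun n : Nat => k + (n : Int) + 3) := by
  induction lines generalizing k with
  | nil => simp [aFindFuzz]
  | cons l rest ih =>
    rw [List.findIdx?_cons]
    by_cases h : PySem.Str.isIn "Fuzzing (in" l = true
    · rw [show aFindFuzz (l :: rest) k = some (k + 3) from by simp only [aFindFuzz, h, if_true, Bool.false_eq_true, if_false]]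
      simp_all
    · rw [show aFindFuzz (l :: rest) k = aFindFuzz rest (k + 1) from by simp only [aFindFuzz, h, if_true, Bool.false_eq_true, if_false], ih]
      cases rest.findIdx? (fun l => PySem.Str.isIn "Fuzzing (in" l) <;> simp_all
      push_cast; ring

theorem aFindEnd_eq (lines : List String) (k : Int) :
    aFindEnd lines k =
      (lines.findIdx? (fun l => PySem.Str.isIn "Stateful (in" l)).map
        (fun n : Nat => k + (n : Int)) := by
  induction lines generalizing k with
  | nil => simp [aFindEnd]
  | cons l rest ih =>
    rw [List.findIdx?_cons]
    by_cases h : PySem.Str.isIn "Stateful (in" l = true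
    · rw [show aFindEnd (l :: rest) k = some k from by simp only [aFindEnd, h, if_true, Bool.false_eq_true, if_false]]
      simp_all
    · rw [show aFindEnd (l :: rest) k = aFindEnd rest (k + 1) from by simp only [aFindEnd, h, if_true, Bool.false_eq_true, if_false], ih]
      cases rest.findIdx? (fun l => PySem.Str.isIn "Stateful (in" l) <;> simp_all
      push_cast; ring

theorem aFindFallback_eq (lines : List String) (k : Int) :
    aFindFallback lines k = (gFall lines).map (fun n : Nat => k + (n : Int) - 1) := by
  induction lines generalizing k with
  | nil => simp [aFindFallback, gFall]
  | cons l rest ih =>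
    by_cases h1 : PySem.Str.isIn "API probing failed" l = true
    · rw [show aFindFallback (l :: rest) k = some (k + 1) from by simp only [aFindFallback, h1, if_true, Bool.false_eq_true, if_false],
          show gFall (l :: rest) = some 2 from by simp only [gFall, h1, if_true, Bool.false_eq_true, if_false]]
      simp; ring
    · by_cases h2 : PySem.Str.isIn "API capabilities" l = true
      · rw [show aFindFallback (l :: rest) k = some (k + 3) from by simp only [aFindFallback, h1, h2, if_true, Bool.false_eq_true, if_false],
            show gFall (l :: rest) = some 4 from by simp only [gFall, h1, h2, if_true, Bool.false_eq_true, if_false]]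
        simp; push_cast; ring
      · rw [show aFindFallback (l :: rest) k = aFindFallback rest (k + 1) from by
              simp only [aFindFallback, h1, h2, if_true, Bool.false_eq_true, if_false],
            show gFall (l :: rest) = (gFall rest).map (· + 1) from by simp only [gFall, h1, h2, if_true, Bool.false_eq_true, if_false], ih]
        cases gFall rest <;> simp
        push_cast; ring

theorem bTail_some (lines : List String) (o : List String) :
    lines.foldl bTailStep (some o) = some (o ++ lines) := by
  induction lines generalizing o with
  | nil => simp
  | cons l rest ih => simp [bTailStep, ih]

theorem bTail_eq (lines : List String) :
    bTail lines =
      (lines.findIdx? (fun l => PySem.Str.isIn "Stateful (in" l)).map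
        (fun n : Nat => lines.drop n) := by
  unfold bTail
  induction lines with
  | nil => simp
  | cons l rest ih =>
    rw [List.foldl_cons, List.findIdx?_cons]
    by_cases h : PySem.Str.isIn "Stateful (in" l = true
    · rw [show bTailStep none l = some [l] from by simp only [bTailStep, h, if_true, Bool.false_eq_true, if_false], bTail_some]
      simp_all
    · rw [show bTailStep none l = none from by simp only [bTailStep, h, if_true, Bool.false_eq_true, if_false], ih]
      cases rest.findIdx? (fun l => PySem.Str.isIn "Stateful (in" l) <;> simp_all

theorem bHeader_pad (hf : Bool) (rest out : List String) (p : Int) (hp : 0 ≤ p) :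
    bHeaderGo hf rest out (some p) = some (out ++ rest.take p.toNat) := by
  induction rest generalizing out p with
  | nil => simp [bHeaderGo]
  | cons l rest ih =>
    by_cases h : p > 0
    · rw [show bHeaderGo hf (l :: rest) out (some p) = bHeaderGo hf rest (out ++ [l]) (some (p - 1))
            from by simp only [bHeaderGo, h, if_true, Bool.false_eq_true, if_false], ih _ _ (by omega)]
      have hpn : p.toNat = (p - 1).toNat + 1 := by omega
      rw [hpn, List.take_succ_cons]
      simp
    · rw [show bHeaderGo hf (l :: rest) out (some p) = some out from by simp only [bHeaderGo, h, if_true, Bool.false_eq_true, if_false]]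
      have hpn : p.toNat = 0 := by omega
      simp [hpn]

theorem bHeader_fuzz (rest out : List String) :
    bHeaderGo true rest out none =
      (rest.findIdx? (fun l => PySem.Str.isIn "Fuzzing (in" l)).map
        (fun n : Nat => out ++ rest.take (n + 4)) := by
  induction rest generalizing out with
  | nil => simp [bHeaderGo]
  | cons l rest ih =>
    rw [List.findIdx?_cons]
    by_cases h : PySem.Str.isIn "Fuzzing (in" l = true
    · rw [show bHeaderGo true (l :: rest) out none = bHeaderGo true rest (out ++ [l]) (some 3)
            from by simp only [bHeaderGo, h, if_true, Bool.false_eq_true, if_false], bHeader_pad _ _ _ _ (by omega)]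
      simp_all [List.take_succ_cons]
    · rw [show bHeaderGo true (l :: rest) out none = bHeaderGo true rest (out ++ [l]) none
            from by simp only [bHeaderGo, h, if_true, Bool.false_eq_true, if_false], ih]
      cases rest.findIdx? (fun l => PySem.Str.isIn "Fuzzing (in" l) <;>
        simp_all [List.take_succ_cons]

theorem bHeader_fall (rest out : List String) :
    bHeaderGo false rest out none =
      (gFall rest).map (fun n : Nat => out ++ rest.take n) := by
  induction rest generalizing out with
  | nil => simp [bHeaderGo, gFall]
  | cons l rest ih =>
    by_cases h1 : PySem.Str.isIn "API probing failed" l = true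
    · rw [show bHeaderGo false (l :: rest) out none = bHeaderGo false rest (out ++ [l]) (some 1)
            from by simp only [bHeaderGo, h1, if_true, Bool.false_eq_true, if_false], bHeader_pad _ _ _ _ (by omega),
          show gFall (l :: rest) = some 2 from by simp only [gFall, h1, if_true, Bool.false_eq_true, if_false]]
      simp [List.take_succ_cons]
    · by_cases h2 : PySem.Str.isIn "API capabilities" l = true
      · rw [show bHeaderGo false (l :: rest) out none = bHeaderGo false rest (out ++ [l]) (some 3)
              from by simp only [bHeaderGo, h1, h2, if_true, Bool.false_eq_true, if_false], bHeader_pad _ _ _ _ (by omega),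
            show gFall (l :: rest) = some 4 from by simp only [gFall, h1, h2, if_true, Bool.false_eq_true, if_false]]
        simp [List.take_succ_cons]
      · rw [show bHeaderGo false (l :: rest) out none = bHeaderGo false rest (out ++ [l]) none
              from by simp only [bHeaderGo, h1, h2, if_true, Bool.false_eq_true, if_false],
            show gFall (l :: rest) = (gFall rest).map (· + 1) from by simp only [gFall, h1, h2, if_true, Bool.false_eq_true, if_false], ih]
        cases gFall rest <;> simp [List.take_succ_cons]

theorem any_eq_findIdx?_isSome (p : String → Bool) (lines : List String) :
    lines.any p = (lines.findIdx? p).isSome := by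
  simp [List.findIdx?_isSome]

-- ===== VERDICT (by name: the statement is the Claim_ definition above) =====
theorem clean_stateful_tests_spec : Claim_equal_clean_stateful_tests := by
  intro lines _
  unfold Spec_clean_stateful_tests clean_stateful_tests clean_stateful_tests_alt
  rw [bTail_eq, aFindFuzz_eq, aFindEnd_eq, aFindFallback_eq,
      any_eq_findIdx?_isSome (fun l => PySem.Str.isIn "Fuzzing (in" l)]
  cases hF : lines.findIdx? (fun l => PySem.Str.isIn "Fuzzing (in" l) with
  | none =>
    simp only [Option.map_none, Option.isSome_none]
    rw [bHeader_fall]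
    cases hE : lines.findIdx? (fun l => PySem.Str.isIn "Stateful (in" l) with
    | none => cases gFall lines <;> simp
    | some e =>
      cases hP : gFall lines with
      | none => simp
      | some n =>
        simp only [Option.map_some]
        rw [PySem.List.slice_to lines (by omega : (0:Int) ≤ 0 + (n : Int) - 1 + 1),
            PySem.List.slice_from lines (by omega : (0:Int) ≤ 0 + (e : Int))]
        have h1 : ((0:Int) + (n : Int) - 1 + 1).toNat = n := by omega
        have h2 : ((0:Int) + (e : Int)).toNat = e := by omega
        simp [h1, h2]
  | some f =>
    simp only [Option.map_some, Option.isSome_some]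
    rw [bHeader_fuzz, hF]
    cases hE : lines.findIdx? (fun l => PySem.Str.isIn "Stateful (in" l) with
    | none => simp
    | some e =>
      simp only [Option.map_some]
      rw [PySem.List.slice_to lines (by omega : (0:Int) ≤ 0 + (f : Int) + 3 + 1),
          PySem.List.slice_from lines (by omega : (0:Int) ≤ 0 + (e : Int))]
      have h1 : ((0:Int) + (f : Int) + 3 + 1).toNat = f + 4 := by omega
      have h2 : ((0:Int) + (e : Int)).toNat = e := by omega
      simp [h1, h2] <;> omega
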